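-- pv_equiv track=rewrite | github.com/avivyeho/C-Compiler | TestSymbolTable.py | assignTypeCheck
-- ===== SOURCE A (Python) =====
-- def assignTypeCheck(type1, type2):
--     if (type1 == "float" and type2 == "int") or (type1 == "int" and type2 == "float"):
--         return True
--     if type1 == type2:
--         return True
--     if type1[-1] == "*":
--         if type2[0] == "&":
--             return assignTypeCheck(type1[0:-1],type2[1:])
--         else:
--             return False
--     return False
-- ===== SOURCE B (Python) =====
-- def assignTypeCheck(type1, type2):
--     # iterative reformulation: strip one trailing '*' / leading '&' pair per turn
--     while True:
--         if (type1 == "float" and type2 == "int") or (type1 == "int" and type2 == "float") or type1 == type2: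
--             return True
--         if type1[-1] != "*" or type2[0] != "&":
--             return False
--         type1 = type1[:-1]
--         type2 = type2[1:]
-- ===== Notes on version B (the rewrite author's own statement) =====
-- stated objective: idiomatic
-- what changed: Replaces the recursion with a single while-True loop that strips one trailing '*' / leading '&' pair per iteration, merging the three success/failure tests into two combined conditions (the exact check order, and hence the IndexError behaviour on empty strings, is preserved and those raising inputs are excluded by Pre_).
import Mathlib
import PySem

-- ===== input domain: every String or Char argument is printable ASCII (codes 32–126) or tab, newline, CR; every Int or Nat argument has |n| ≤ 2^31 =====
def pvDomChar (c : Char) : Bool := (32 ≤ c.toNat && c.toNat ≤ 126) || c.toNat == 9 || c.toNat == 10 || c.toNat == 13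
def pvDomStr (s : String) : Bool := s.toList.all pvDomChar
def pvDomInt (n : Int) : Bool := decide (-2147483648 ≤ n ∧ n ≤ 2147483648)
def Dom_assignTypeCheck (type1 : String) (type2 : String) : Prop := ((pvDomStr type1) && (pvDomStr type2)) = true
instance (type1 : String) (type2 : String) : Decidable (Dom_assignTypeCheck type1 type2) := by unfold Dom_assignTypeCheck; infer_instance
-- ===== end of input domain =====

-- B replaces A's recursion by an iterative strip-one-pair-per-turn loop with merged conditions (objective: idiomatic); inputs where the Python raises IndexError are excluded by Pre_.


-- ===== PORT A =====
def assignTypeCheck (type1 : String) (type2 : String) : Bool :=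
  if (type1 = "float" ∧ type2 = "int") ∨ (type1 = "int" ∧ type2 = "float") then true
  else if type1 = type2 then true
  else match h1 : PySem.Str.pyGet? type1 (-1) with
    | some c =>
      if c = '*' then
        match PySem.Str.pyGet? type2 0 with
        | some d =>
          if d = '&' then
            assignTypeCheck (PySem.Str.slice type1 none (some (-1))) (PySem.Str.slice type2 (some 1) none)
          else false
        | none => false  -- Python raises IndexError here (outside Pre_)
      else false
    | none => false  -- Python raises IndexError here (outside Pre_)
termination_by type1.toList.length
decreasing_by
  have hne : type1.toList ≠ [] := by
    intro h
    rw [show ((-1 : Int)) = ((-1 : Int)) from rfl] at h1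
    simp [PySem.Str.pyGet?, PySem.List.pyGet?_neg_one, h] at h1
  have hpos : 0 < type1.toList.length := List.length_pos_iff.mpr hne
  rw [PySem.Str.slice_to_neg_one, List.length_dropLast]
  omega

-- ===== PORT B =====
def altLoop (t1 : List Char) (t2 : List Char) : Bool :=
  if (t1 = "float".toList ∧ t2 = "int".toList) ∨ (t1 = "int".toList ∧ t2 = "float".toList) ∨ t1 = t2 then
    true
  else
    match h1 : t1.getLast?, t2.head? with
    | some '*', some '&' => altLoop t1.dropLast t2.tail
    | _, _ => false
termination_by t1.length
decreasing_by
  have hne : t1 ≠ [] := by intro h; rw [h] at h1; simp at h1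
  have hpos : 0 < t1.length := List.length_pos_iff.mpr hne
  simp [List.length_dropLast]
  omega

def assignTypeCheck_alt (type1 : String) (type2 : String) : Bool :=
  altLoop type1.toList type2.toList

-- ===== PRECONDITION & SPEC =====
-- Pre_ excludes exactly the inputs on which Python A raises IndexError: an all-'*' type1 that is
-- consumed while type2 still has characters left, or an all-'&' type2 shorter than type1's trailing '*' run.
def Pre_assignTypeCheck (type1 : String) (type2 : String) : Prop :=
  ¬ ((type1.toList.all (· = '*') ∧
        type1.toList.length ≤ (type2.toList.takeWhile (· = '&')).length ∧
        type1.toList.length < type2.toList.length) ∨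
     (type2.toList.all (· = '&') ∧
        type2.toList.length < (type1.toList.reverse.takeWhile (· = '*')).length))
instance (type1 : String) (type2 : String) : Decidable (Pre_assignTypeCheck type1 type2) := by
  unfold Pre_assignTypeCheck; infer_instance

def pvWitness_assignTypeCheck : String × String := ("int*", "&int")

def Spec_assignTypeCheck (type1 : String) (type2 : String) (out : Bool) : Prop := out = assignTypeCheck_alt type1 type2
instance (type1 : String) (type2 : String) (out : Bool) : Decidable (Spec_assignTypeCheck type1 type2 out) := by unfold Spec_assignTypeCheck; infer_instance

-- ===== CLAIM (what is proved, stated in full; the proofs are below) =====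
def Claim_equal_assignTypeCheck : Prop := ∀ (type1 : String) (type2 : String), Dom_assignTypeCheck type1 type2 → Pre_assignTypeCheck type1 type2 → Spec_assignTypeCheck type1 type2 (assignTypeCheck type1 type2)

-- ===== LEMMAS AND PROOFS =====

theorem str_pyGet_neg_one (s : String) : PySem.Str.pyGet? s (-1) = s.toList.getLast? := by
  simp [PySem.Str.pyGet?, PySem.List.pyGet?_neg_one]

theorem str_pyGet_zero (s : String) : PySem.Str.pyGet? s 0 = s.toList.head? := by
  simp [PySem.Str.pyGet?, PySem.List.pyGet?_zero, List.head?_eq_getElem?]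

theorem str_slice_drop_last (s : String) :
    (PySem.Str.slice s none (some (-1))).toList = s.toList.dropLast :=
  PySem.Str.slice_to_neg_one s

theorem str_slice_tail (s : String) :
    (PySem.Str.slice s (some 1) none).toList = s.toList.tail := by
  simp [PySem.Str.slice, PySem.List.slice_from_one]

theorem altLoop_cond_neg (t1 t2 : String)
    (hp : ¬(t1 = "float" ∧ t2 = "int" ∨ t1 = "int" ∧ t2 = "float")) (hne : ¬t1 = t2) :
    ¬((t1.toList = "float".toList ∧ t2.toList = "int".toList) ∨
      (t1.toList = "int".toList ∧ t2.toList = "float".toList) ∨ t1.toList = t2.toList) := by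
  rintro (⟨ha, hb⟩ | ⟨ha, hb⟩ | ha)
  · exact hp (Or.inl ⟨String.toList_inj.mp ha, String.toList_inj.mp hb⟩)
  · exact hp (Or.inr ⟨String.toList_inj.mp ha, String.toList_inj.mp hb⟩)
  · exact hne (String.toList_inj.mp ha)

theorem assignTypeCheck_eq_alt (type1 type2 : String) :
    assignTypeCheck type1 type2 = assignTypeCheck_alt type1 type2 := by
  fun_induction assignTypeCheck type1 type2 with
  | case1 t1 t2 h =>
    unfold assignTypeCheck_alt
    rw [altLoop, if_pos]
    rcases h with ⟨ha, hb⟩ | ⟨ha, hb⟩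
    · exact Or.inl ⟨by rw [ha], by rw [hb]⟩
    · exact Or.inr (Or.inl ⟨by rw [ha], by rw [hb]⟩)
  | case2 t h =>
    unfold assignTypeCheck_alt
    rw [altLoop, if_pos (Or.inr (Or.inr rfl))]
  | case3 t1 t2 hp hne h1 h2 ih =>
    have hl : t1.toList.getLast? = some '*' := by rw [← str_pyGet_neg_one]; exact h1
    have hh : t2.toList.head? = some '&' := by rw [← str_pyGet_zero]; exact h2
    unfold assignTypeCheck_alt at ih ⊢
    rw [altLoop, if_neg (altLoop_cond_neg t1 t2 hp hne), hl, hh]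
    rw [str_slice_drop_last, str_slice_tail] at ih
    exact ih
  | case4 t1 t2 hp hne d hh hd h1 =>
    have hl : t1.toList.getLast? = some '*' := by rw [← str_pyGet_neg_one]; exact h1
    have hh' : t2.toList.head? = some d := by rw [← str_pyGet_zero]; exact hh
    unfold assignTypeCheck_alt
    rw [altLoop, if_neg (altLoop_cond_neg t1 t2 hp hne), hl, hh']
    split <;> simp_all
  | case5 t1 t2 hp hne hh h1 =>
    have hl : t1.toList.getLast? = some '*' := by rw [← str_pyGet_neg_one]; exact h1
    have hh' : t2.toList.head? = none := by rw [← str_pyGet_zero]; exact hh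
    unfold assignTypeCheck_alt
    rw [altLoop, if_neg (altLoop_cond_neg t1 t2 hp hne), hl, hh']
    split <;> simp_all
  | case6 t1 t2 hp hne c h1 hc =>
    have hl : t1.toList.getLast? = some c := by rw [← str_pyGet_neg_one]; exact h1
    unfold assignTypeCheck_alt
    rw [altLoop, if_neg (altLoop_cond_neg t1 t2 hp hne), hl]
    split <;> simp_all
  | case7 t1 t2 hp hne h1 =>
    have hl : t1.toList.getLast? = none := by rw [← str_pyGet_neg_one]; exact h1
    unfold assignTypeCheck_alt
    rw [altLoop, if_neg (altLoop_cond_neg t1 t2 hp hne), hl]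

-- ===== VERDICT (by name: the statement is the Claim_ definition above) =====
theorem assignTypeCheck_spec : Claim_equal_assignTypeCheck := by
  intro t1 t2 _ _
  unfold Spec_assignTypeCheck
  exact assignTypeCheck_eq_alt t1 t2
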